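-- pv_equiv track=rewrite | github.com/swingerman/skills | plugins/crap-analyzer/skills/crap-analyzer/scripts/compute_crap.py | strip_python
-- ===== SOURCE A (Python) =====
-- def _blank_preserving_newlines(s: str) -> str:
--     return "".join(" " if ch != "\n" else "\n" for ch in s)
--
-- def strip_python(src: str) -> str:
--     """Blank out strings (including triple-quoted / f-strings) and comments in Python."""
--     out: list[str] = []
--     i = 0
--     n = len(src)
--     while i < n:
--         c = src[i]
--         if c == "#":
--             j = src.find("\n", i)
--             j = n if j == -1 else j
--             out.append(" " * (j - i))
--             i = j
--             continue
--         # triple-quoted strings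
--         if (c in ("'", '"')) and src[i:i + 3] in ("'''", '"""'):
--             quote = src[i:i + 3]
--             j = src.find(quote, i + 3)
--             j = n if j == -1 else j + 3
--             out.append(_blank_preserving_newlines(src[i:j]))
--             i = j
--             continue
--         # single-quoted (possibly prefixed: r, b, f, rb, fr, etc.)
--         if c in ("'", '"'):
--             quote = c
--             j = i + 1
--             while j < n:
--                 if src[j] == "\\" and j + 1 < n:
--                     j += 2
--                     continue
--                 if src[j] == quote or src[j] == "\n":
--                     if src[j] == quote:
--                         j += 1
--                     break
--                 j += 1
--             out.append(_blank_preserving_newlines(src[i:j]))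
--             i = j
--             continue
--         out.append(c)
--         i += 1
--     return "".join(out)
-- ===== SOURCE B (Python) =====
-- NORMAL, COMMENT, Q1, Q2, SINGLE, ESC, TRIPLE = range(7)
--
-- def _normal_step(ch):
--     # returns (state, quote, emitted char)
--     if ch == "#":
--         return (COMMENT, "", " ")
--     if ch == "'" or ch == '"':
--         return (Q1, ch, " ")
--     return (NORMAL, "", ch)
--
-- def _single_step(ch, quote):
--     # inside a single-quoted string; returns (state, emitted char)
--     if ch == quote:
--         return (NORMAL, " ")
--     if ch == "\n":
--         return (NORMAL, "\n")
--     if ch == "\\":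
--         return (ESC, " ")
--     return (SINGLE, " ")
--
-- def strip_python(src: str) -> str:
--     """Blank out strings (including triple-quoted / f-strings) and comments in Python."""
--     out = []
--     state = NORMAL
--     quote = ""
--     tcount = 0  # consecutive closing-quote chars matched inside a triple string
--     for ch in src:
--         if state == NORMAL:
--             state, quote, e = _normal_step(ch)
--             out.append(e)
--         elif state == COMMENT:
--             if ch == "\n":
--                 state = NORMAL
--                 out.append("\n")
--             else:
--                 out.append(" ")
--         elif state == Q1:
--             if ch == quote:
--                 state = Q2
--                 out.append(" ")
--             else:
--                 state, e = _single_step(ch, quote)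
--                 out.append(e)
--         elif state == Q2:
--             if ch == quote:
--                 state = TRIPLE
--                 tcount = 0
--                 out.append(" ")
--             else:
--                 state, quote, e = _normal_step(ch)
--                 out.append(e)
--         elif state == SINGLE:
--             state, e = _single_step(ch, quote)
--             out.append(e)
--         elif state == ESC:
--             state = SINGLE
--             out.append("\n" if ch == "\n" else " ")
--         else:  # TRIPLE
--             if ch == quote:
--                 if tcount == 2:
--                     state = NORMAL
--                 else:
--                     tcount += 1
--                 out.append(" ")
--             else:
--                 tcount = 0
--                 out.append("\n" if ch == "\n" else " ")
--     return "".join(out)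
-- ===== Notes on version B (the rewrite author's own statement) =====
-- stated objective: alternative
-- what changed: Replaces A's index-jumping loop (str.find to locate comment/string ends, slicing and blanking whole chunks) with a single left-to-right character-at-a-time finite state machine (NORMAL/COMMENT/Q1/Q2/SINGLE/ESC/TRIPLE) that emits one blanked character per input character.
import Mathlib
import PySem

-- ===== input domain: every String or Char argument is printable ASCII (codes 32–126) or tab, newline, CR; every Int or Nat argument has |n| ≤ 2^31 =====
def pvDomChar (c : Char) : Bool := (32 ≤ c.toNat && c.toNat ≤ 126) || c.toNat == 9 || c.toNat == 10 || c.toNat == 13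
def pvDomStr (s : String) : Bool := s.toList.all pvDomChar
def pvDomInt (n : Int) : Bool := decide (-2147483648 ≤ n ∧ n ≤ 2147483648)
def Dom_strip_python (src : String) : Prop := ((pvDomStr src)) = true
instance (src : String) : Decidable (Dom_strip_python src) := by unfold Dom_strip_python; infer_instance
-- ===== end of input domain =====

-- B replaces A's index-jumping loop (str.find / slice whole chunks) with a single
-- character-at-a-time finite state machine; alternative decomposition, same O(n) cost.

-- ===== PORT A =====
-- _blank_preserving_newlines
def blankPN (s : List Char) : List Char := s.map (fun ch => if ch ≠ '\n' then ' ' else '\n')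

-- A's inner `while j < n` scan of a single-quoted string; returns the final j
def stripScan (s : List Char) (quote : Char) (j : Nat) : Nat :=
  if h : j < s.length then
    if s[j] = '\\' ∧ j + 1 < s.length then stripScan s quote (j + 2)
    else if s[j] = quote ∨ s[j] = '\n' then (if s[j] = quote then j + 1 else j)
    else stripScan s quote (j + 1)
  else j
termination_by s.length - j

-- A's outer `while i < n` loop; fuel decreases by one per iteration (each iteration
-- advances i by at least one, so `length + 1` fuel at i = 0 is never exhausted)
def stripAux (s : List Char) (fuel : Nat) (i : Nat) : List Char :=
  match fuel with
  | 0 => []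
  | fuel + 1 =>
    if h : i < s.length then
      let c := s[i]
      if c = '#' then
        let j : Int := PySem.Chars.findFrom s ['\n'] (i : Int) none
        let j : Nat := if j = -1 then s.length else j.toNat
        List.replicate (j - i) ' ' ++ stripAux s fuel j
      else if (c = '\'' ∨ c = '"') ∧
          (PySem.List.slice s (some (i : Int)) (some ((i : Int) + 3)) = ['\'', '\'', '\''] ∨
           PySem.List.slice s (some (i : Int)) (some ((i : Int) + 3)) = ['"', '"', '"']) then
        let quote := PySem.List.slice s (some (i : Int)) (some ((i : Int) + 3))
        let j : Int := PySem.Chars.findFrom s quote ((i : Int) + 3) none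
        let j : Nat := if j = -1 then s.length else j.toNat + 3
        blankPN (PySem.List.slice s (some (i : Int)) (some (j : Int))) ++ stripAux s fuel j
      else if c = '\'' ∨ c = '"' then
        let j := stripScan s c (i + 1)
        blankPN (PySem.List.slice s (some (i : Int)) (some (j : Int))) ++ stripAux s fuel j
      else
        c :: stripAux s fuel (i + 1)
    else []

def strip_python (src : String) : String :=
  String.ofList (stripAux src.toList (src.toList.length + 1) 0)

-- ===== PORT B =====
-- Source B's state constants NORMAL..TRIPLE together with the active quote / tcount variables
inductive PyMode where
  | normal | comment
  | q1 (q : Char) | q2 (q : Char) | single (q : Char) | esc (q : Char)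
  | triple (q : Char) (k : Nat)
deriving DecidableEq, Repr

-- _normal_step
def normalStep (c : Char) : PyMode × List Char :=
  if c = '#' then (.comment, [' '])
  else if c = '\'' ∨ c = '"' then (.q1 c, [' '])
  else (.normal, [c])

-- _single_step
def singleStep (q c : Char) : PyMode × List Char :=
  if c = q then (.normal, [' '])
  else if c = '\n' then (.normal, ['\n'])
  else if c = '\\' then (.esc q, [' '])
  else (.single q, [' '])

-- the body of Source B's `for ch in src` loop
def stepB : PyMode → Char → PyMode × List Char
  | .normal, c => normalStep c
  | .comment, c => if c = '\n' then (.normal, ['\n']) else (.comment, [' '])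
  | .q1 q, c => if c = q then (.q2 q, [' ']) else singleStep q c
  | .q2 q, c => if c = q then (.triple q 0, [' ']) else normalStep c
  | .single q, c => singleStep q c
  | .esc q, c => (.single q, [if c = '\n' then '\n' else ' '])
  | .triple q k, c =>
      if c = q then (if k = 2 then (.normal, [' ']) else (.triple q (k + 1), [' ']))
      else (.triple q 0, [if c = '\n' then '\n' else ' '])

def strip_python_alt (src : String) : String :=
  String.ofList
    (src.toList.foldl (fun st c => let r := stepB st.1 c; (r.1, st.2 ++ r.2))
      ((PyMode.normal : PyMode), ([] : List Char))).2

-- ===== PRECONDITION & SPEC =====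
def Spec_strip_python (src : String) (out : String) : Prop := out = strip_python_alt src
instance (src : String) (out : String) : Decidable (Spec_strip_python src out) := by unfold Spec_strip_python; infer_instance

-- ===== CLAIM (what is proved, stated in full; the proofs are below) =====
def Claim_equal_strip_python : Prop := ∀ (src : String), Dom_strip_python src → Spec_strip_python src (strip_python src)

-- ===== LEMMAS AND PROOFS =====

-- B's run as structural recursion over the input characters
def runB (m : PyMode) : List Char → List Char
  | [] => []
  | c :: cs => (stepB m c).2 ++ runB (stepB m c).1 cs

theorem runB_cons (m : PyMode) (c : Char) (cs : List Char) :
    runB m (c :: cs) = (stepB m c).2 ++ runB (stepB m c).1 cs := rfl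

theorem foldB_eq (cs : List Char) : ∀ (m : PyMode) (out : List Char),
    (cs.foldl (fun st c => let r := stepB st.1 c; (r.1, st.2 ++ r.2)) (m, out)).2
      = out ++ runB m cs := by
  induction cs with
  | nil => simp [runB]
  | cons c cs ih => intro m out; simp [runB, ih, List.append_assoc]

-- A's single-quote scan, phrased on the suffix list
def scanS (q : Char) : List Char → Nat
  | [] => 0
  | [c] => if c = q then 1 else if c = '\n' then 0 else 1
  | c :: c2 :: cs =>
      if c = '\\' then 2 + scanS q cs
      else if c = q then 1
      else if c = '\n' then 0
      else 1 + scanS q (c2 :: cs)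

-- B's triple-quote counter, phrased on the suffix list
def scanT (q : Char) (k : Nat) : List Char → Nat
  | [] => 0
  | c :: cs => if c = q then (if k = 2 then 1 else 1 + scanT q (k + 1) cs) else 1 + scanT q 0 cs

theorem drop_takeWhile_len (p : Char → Bool) (l : List Char) :
    l.drop (l.takeWhile p).length = l.dropWhile p := by
  have h := @List.drop_left _ (l.takeWhile p) (l.dropWhile p)
  rwa [List.takeWhile_append_dropWhile] at h

theorem singleton_prefix_iff (a : Char) (l : List Char) : [a] <+: l ↔ l.head? = some a := by
  cases l <;> simp [List.cons_prefix_cons, eq_comm]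

theorem find_too_short (cs sub : List Char) (h : cs.length < sub.length) :
    PySem.Chars.find cs sub = -1 := by
  rw [PySem.Chars.find_eq_neg_one_iff]
  intro hinf
  exact absurd hinf.length_le (by omega)

-- find is the unique position that carries a prefix minimally
theorem find_eq_of (cs sub : List Char) (j : Nat) (hpre : sub <+: cs.drop j)
    (hmin : ∀ i < j, ¬ sub <+: cs.drop i) : PySem.Chars.find cs sub = (j : Int) := by
  have hinf : sub <:+: cs := hpre.isInfix.trans (List.drop_suffix j cs).isInfix
  have hnn : 0 ≤ PySem.Chars.find cs sub := (PySem.Chars.find_nonneg_iff cs sub).2 hinf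
  obtain ⟨h1, h2⟩ := PySem.Chars.find_spec hnn
  have hle : ¬ (PySem.Chars.find cs sub).toNat < j := fun h => hmin _ h h1
  have hge : ¬ j < (PySem.Chars.find cs sub).toNat := fun h => h2 _ h hpre
  omega


-- shifting find across a head that carries no match
theorem find_cons (c : Char) (cs sub : List Char) (h0 : ¬ sub <+: (c :: cs)) :
    PySem.Chars.find (c :: cs) sub =
      if PySem.Chars.find cs sub = -1 then -1 else PySem.Chars.find cs sub + 1 := by
  by_cases h : PySem.Chars.find cs sub = -1
  · rw [if_pos h]
    rw [PySem.Chars.find_eq_neg_one_iff] at h ⊢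
    rw [List.infix_cons_iff]
    rintro (hp | hi)
    · exact h0 hp
    · exact h hi
  · rw [if_neg h]
    have hnn : 0 ≤ PySem.Chars.find cs sub := by
      have := PySem.Chars.neg_one_le_find cs sub; omega
    obtain ⟨h1, h2⟩ := PySem.Chars.find_spec hnn
    have := find_eq_of (c :: cs) sub ((PySem.Chars.find cs sub).toNat + 1)
      (by simpa using h1)
      (by
        intro i hi
        match i with
        | 0 => exact h0
        | i + 1 => exact fun hp => h2 i (by omega) (by simpa using hp))
    rw [this]
    have := Int.toNat_of_nonneg hnn
    omega


theorem find_singleton (cs : List Char) (a : Char) :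
    PySem.Chars.find cs [a] =
      if a ∈ cs then ((cs.takeWhile (· ≠ a)).length : Int) else -1 := by
  by_cases h : a ∈ cs
  · rw [if_pos h]
    apply find_eq_of
    · rw [singleton_prefix_iff, drop_takeWhile_len]
      have hne : cs.dropWhile (· ≠ a) ≠ [] := by
        intro he
        have := List.takeWhile_append_dropWhile (p := (· ≠ a)) (l := cs)
        rw [he, List.append_nil] at this
        rw [← this] at h
        have := List.mem_takeWhile_imp h
        simp at this
      rw [List.head?_eq_some_head hne]
      have := List.head_dropWhile_not (p := (· ≠ a)) (l := cs) hne
      simpa using this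
    · intro i hi hp
      rw [singleton_prefix_iff] at hp
      have hil : i < cs.length :=
        lt_of_lt_of_le hi ((List.takeWhile_sublist _).length_le)
      rw [List.head?_drop, List.getElem?_eq_getElem hil] at hp
      have hgt : (cs.takeWhile (· ≠ a))[i] = cs[i] :=
        (List.takeWhile_prefix _).getElem hi
      have hpt := List.mem_takeWhile_imp (List.getElem_mem hi)
      rw [hgt] at hpt
      simp at hp hpt
      exact hpt hp
  · rw [if_neg h, PySem.Chars.find_eq_neg_one_iff]
    intro hinf
    exact h (hinf.mem (by simp))


theorem scanT_zero_find (q : Char) (cs : List Char) :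
    (scanT q 0 cs : Int) =
      if PySem.Chars.find cs [q, q, q] = -1 then (cs.length : Int)
      else PySem.Chars.find cs [q, q, q] + 3 := by
  suffices H : ∀ n (cs : List Char), cs.length ≤ n →
      (scanT q 0 cs : Int) =
        if PySem.Chars.find cs [q, q, q] = -1 then (cs.length : Int)
        else PySem.Chars.find cs [q, q, q] + 3 from H cs.length cs le_rfl
  intro n
  induction n with
  | zero =>
    intro cs hlen
    have : cs = [] := List.eq_nil_of_length_eq_zero (by omega)
    subst this
    simp [scanT, find_too_short [] [q,q,q] (by simp)]
  | succ n ih =>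
    intro cs hlen
    match cs with
    | [] => simp [scanT, find_too_short [] [q,q,q] (by simp)]
    | c :: cs' =>
      by_cases hc : q = c
      · subst hc
        match cs' with
        | [] => simp [scanT, find_too_short [q] [q,q,q] (by simp)]
        | c2 :: cs'' =>
          by_cases hc2 : q = c2
          · subst hc2
            match cs'' with
            | [] => simp [scanT, find_too_short [q,q] [q,q,q] (by simp)]
            | c3 :: cs3 =>
              by_cases hc3 : q = c3
              · subst hc3
                have hf : PySem.Chars.find (q :: q :: q :: cs3) [q,q,q] = (0 : Int) :=
                  find_eq_of _ _ 0 (by simp [List.cons_prefix_cons]) (by omega)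
                simp [scanT, hf]
              · have h1 : PySem.Chars.find (q :: q :: c3 :: cs3) [q,q,q]
                    = if PySem.Chars.find (q :: c3 :: cs3) [q,q,q] = -1 then -1
                      else PySem.Chars.find (q :: c3 :: cs3) [q,q,q] + 1 :=
                  find_cons _ _ _ (by simp [List.cons_prefix_cons, hc3])
                have h2 : PySem.Chars.find (q :: c3 :: cs3) [q,q,q]
                    = if PySem.Chars.find (c3 :: cs3) [q,q,q] = -1 then -1
                      else PySem.Chars.find (c3 :: cs3) [q,q,q] + 1 :=
                  find_cons _ _ _ (by simp [List.cons_prefix_cons, hc3])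
                have h3 : PySem.Chars.find (c3 :: cs3) [q,q,q]
                    = if PySem.Chars.find cs3 [q,q,q] = -1 then -1
                      else PySem.Chars.find cs3 [q,q,q] + 1 :=
                  find_cons _ _ _ (by simp [List.cons_prefix_cons, hc3])
                have hih := ih cs3 (by simp at hlen; omega)
                have hb := PySem.Chars.neg_one_le_find cs3 [q,q,q]
                simp only [scanT, if_neg (Ne.symm hc3)]
                by_cases hm : PySem.Chars.find cs3 [q,q,q] = -1 <;>
                  · simp only [hm] at h1 h2 h3 hih ⊢
                    simp at h1 h2 h3 hih ⊢
                    omega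
          · have h1 : PySem.Chars.find (q :: c2 :: cs'') [q,q,q]
                = if PySem.Chars.find (c2 :: cs'') [q,q,q] = -1 then -1
                  else PySem.Chars.find (c2 :: cs'') [q,q,q] + 1 :=
              find_cons _ _ _ (by simp [List.cons_prefix_cons, hc2])
            have h2 : PySem.Chars.find (c2 :: cs'') [q,q,q]
                = if PySem.Chars.find cs'' [q,q,q] = -1 then -1
                  else PySem.Chars.find cs'' [q,q,q] + 1 :=
              find_cons _ _ _ (by simp [List.cons_prefix_cons, hc2])
            have hih := ih cs'' (by simp at hlen; omega)
            have hb := PySem.Chars.neg_one_le_find cs'' [q,q,q]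
            simp only [scanT, if_neg (Ne.symm hc2)]
            by_cases hm : PySem.Chars.find cs'' [q,q,q] = -1 <;>
              · simp only [hm] at h1 h2 hih ⊢
                simp at h1 h2 hih ⊢
                omega
      · have h1 : PySem.Chars.find (c :: cs') [q,q,q]
            = if PySem.Chars.find cs' [q,q,q] = -1 then -1
              else PySem.Chars.find cs' [q,q,q] + 1 :=
          find_cons _ _ _ (by simp [List.cons_prefix_cons, hc])
        have hih := ih cs' (by simp at hlen; omega)
        have hb := PySem.Chars.neg_one_le_find cs' [q,q,q]
        simp only [scanT, if_neg (Ne.symm hc)]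
        by_cases hm : PySem.Chars.find cs' [q,q,q] = -1 <;>
          · simp only [hm] at h1 hih ⊢
            simp at h1 hih ⊢
            omega


theorem runB_comment (cs : List Char) :
    runB .comment cs =
      List.replicate (cs.takeWhile (· ≠ '\n')).length ' ' ++ runB .normal (cs.dropWhile (· ≠ '\n')) := by
  induction cs with
  | nil => simp [runB]
  | cons c cs ih =>
    by_cases hc : c = '\n'
    · subst hc
      simp [runB, stepB, normalStep]
    · simp [runB, stepB, hc, ih, List.replicate_succ]


theorem runB_single (q : Char) (hq : q = '\'' ∨ q = '"') (cs : List Char) :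
    runB (.single q) cs = blankPN (cs.take (scanS q cs)) ++ runB .normal (cs.drop (scanS q cs)) := by
  have hqn : q ≠ '\n' := by rcases hq with h | h <;> subst h <;> decide
  have hqb : q ≠ '\\' := by rcases hq with h | h <;> subst h <;> decide
  suffices H : ∀ n (cs : List Char), cs.length ≤ n →
      runB (.single q) cs = blankPN (cs.take (scanS q cs)) ++ runB .normal (cs.drop (scanS q cs)) from
    H cs.length cs le_rfl
  intro n
  induction n with
  | zero =>
    intro cs hlen
    have : cs = [] := List.eq_nil_of_length_eq_zero (by omega)
    subst this
    simp [runB, scanS, blankPN]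
  | succ n ih =>
    intro cs hlen
    match cs with
    | [] => simp [runB, scanS, blankPN]
    | [c] =>
      by_cases h1 : c = q
      · subst h1
        simp [runB, scanS, stepB, singleStep, blankPN, hqn]
      · by_cases h2 : c = '\n'
        · subst h2
          simp [runB, scanS, stepB, singleStep, normalStep, Ne.symm hqn, blankPN]
        · by_cases h3 : c = '\\'
          · subst h3
            simp [runB, scanS, stepB, singleStep, blankPN, Ne.symm hqb, h2]
          · simp [runB, scanS, stepB, singleStep, blankPN, h1, h2, h3]
    | c :: c2 :: cs' =>
      by_cases h3 : c = '\\'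
      · subst h3
        have hih := ih cs' (by simp at hlen ⊢; omega)
        simp only [runB, stepB, singleStep, if_neg (Ne.symm hqb)]
        simp only [scanS]
        rw [show 2 + scanS q cs' = scanS q cs' + 1 + 1 from by omega]
        simp [hih, blankPN, List.take_succ_cons, List.drop_succ_cons]
      · by_cases h1 : c = q
        · subst h1
          simp [runB, scanS, stepB, singleStep, blankPN, hqn, h3]
        · by_cases h2 : c = '\n'
          · subst h2
            simp [runB, scanS, stepB, singleStep, normalStep, Ne.symm hqn, blankPN, h3]
          · have hih := ih (c2 :: cs') (by simp at hlen ⊢; omega)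
            rw [runB_cons]
            simp only [stepB, singleStep, if_neg h1, if_neg h2, if_neg h3]
            simp only [scanS, if_neg h3, if_neg h1, if_neg h2]
            rw [show 1 + scanS q (c2 :: cs') = scanS q (c2 :: cs') + 1 from by omega]
            simp [hih, blankPN, List.take_succ_cons, List.drop_succ_cons, h2]


theorem runB_triple (q : Char) (hq : q = '\'' ∨ q = '"') (cs : List Char) : ∀ k,
    runB (.triple q k) cs = blankPN (cs.take (scanT q k cs)) ++ runB .normal (cs.drop (scanT q k cs)) := by
  have hqn : q ≠ '\n' := by rcases hq with h | h <;> subst h <;> decide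
  induction cs with
  | nil => intro k; simp [runB, scanT, blankPN]
  | cons c cs ih =>
    intro k
    by_cases hc : q = c
    · subst hc
      by_cases hk : k = 2
      · subst hk
        rw [runB_cons]
        simp [stepB, scanT, blankPN, hqn]
      · rw [runB_cons]
        simp only [stepB, if_neg hk]
        simp only [scanT, if_neg hk]
        rw [show 1 + scanT q (k + 1) cs = scanT q (k + 1) cs + 1 from by omega]
        simp [ih, blankPN, List.take_succ_cons, List.drop_succ_cons, hqn]
    · rw [runB_cons]
      simp only [stepB, if_neg (Ne.symm hc)]
      simp only [scanT, if_neg (Ne.symm hc)]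
      rw [show 1 + scanT q 0 cs = scanT q 0 cs + 1 from by omega]
      simp [ih, blankPN, List.take_succ_cons, List.drop_succ_cons]



theorem scanS_le (q : Char) (cs : List Char) : scanS q cs ≤ cs.length := by
  suffices H : ∀ n (cs : List Char), cs.length ≤ n → scanS q cs ≤ cs.length from H cs.length cs le_rfl
  intro n
  induction n with
  | zero =>
    intro cs h
    have : cs = [] := List.eq_nil_of_length_eq_zero (by omega)
    subst this
    simp [scanS]
  | succ n ih =>
    intro cs h
    match cs with
    | [] => simp [scanS]
    | [c] => simp only [scanS]; split_ifs <;> simp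
    | c :: c2 :: cs' =>
      have h1 := ih cs' (by simp at h ⊢; omega)
      have h2 := ih (c2 :: cs') (by simp at h ⊢; omega)
      simp only [scanS]
      split_ifs <;> simp at h1 h2 ⊢ <;> omega

theorem runB_q1 (q : Char) (hq : q = '\'' ∨ q = '"') (t : List Char) (ht : t.take 2 ≠ [q, q]) :
    runB (.q1 q) t = blankPN (t.take (scanS q t)) ++ runB .normal (t.drop (scanS q t)) := by
  have hqn : q ≠ '\n' := by rcases hq with h | h <;> subst h <;> decide
  have hqb : q ≠ '\\' := by rcases hq with h | h <;> subst h <;> decide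
  match t with
  | [] => simp [runB, scanS, blankPN]
  | c1 :: t1 =>
    by_cases hc1 : q = c1
    · subst hc1
      match t1 with
      | [] =>
        rw [runB_cons]
        simp [stepB, runB, scanS, blankPN, hqn]
      | c2 :: t2 =>
        have hc2 : ¬ c2 = q := by intro h; exact ht (by simp [h])
        rw [runB_cons]
        rw [show stepB (.q1 q) q = (.q2 q, [' ']) from by simp [stepB]]
        rw [runB_cons]
        rw [show stepB (.q2 q) c2 = normalStep c2 from by simp [stepB, hc2]]
        simp [scanS, blankPN, hqn, hqb, runB_cons, stepB]
    · have : runB (.q1 q) (c1 :: t1) = runB (.single q) (c1 :: t1) := by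
        rw [runB_cons, runB_cons]
        simp only [stepB]
        rw [if_neg (fun h : c1 = q => hc1 h.symm)]
      rw [this, runB_single q hq]

theorem stripScan_eq (s : List Char) (q : Char) : ∀ j : Nat,
    stripScan s q j = j + scanS q (s.drop j) := by
  suffices H : ∀ m j, s.length - j ≤ m → stripScan s q j = j + scanS q (s.drop j) from
    fun j => H s.length j (by omega)
  intro m
  induction m with
  | zero =>
    intro j hj
    have hge : s.length ≤ j := by omega
    rw [stripScan, dif_neg (by omega), List.drop_eq_nil_of_le hge]
    simp [scanS]
  | succ m ih =>
    intro j hj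
    by_cases h : j < s.length
    · rw [stripScan, dif_pos h]
      by_cases h2 : j + 1 < s.length
      · have hd : s.drop j = s[j] :: s[j+1] :: s.drop (j+2) := by
          rw [List.drop_eq_getElem_cons h, List.drop_eq_getElem_cons h2]
        by_cases hb : s[j] = '\\'
        · rw [if_pos ⟨hb, h2⟩, ih (j+2) (by omega), hd, hb]
          simp [scanS]
          omega
        · rw [if_neg (by tauto), hd]
          by_cases hq1 : s[j] = q
          · have hqb : ¬ q = '\\' := hq1 ▸ hb
            rw [if_pos (Or.inl hq1), if_pos hq1]
            simp [scanS, hq1, hqb]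
          · by_cases hn : s[j] = '\n'
            · have hnq : ¬ '\n' = q := hn ▸ hq1
              rw [if_pos (Or.inr hn), if_neg hq1]
              simp [scanS, hn, hnq]
            · rw [if_neg (by tauto), ih (j+1) (by omega), List.drop_eq_getElem_cons h2]
              simp [scanS, hb, hq1, hn]
              omega
      · have hd : s.drop j = [s[j]] := by
          rw [List.drop_eq_getElem_cons h, List.drop_eq_nil_of_le (by omega)]
        rw [if_neg (by tauto), hd]
        by_cases hq1 : s[j] = q
        · rw [if_pos (Or.inl hq1), if_pos hq1]
          simp [scanS, hq1]
        · by_cases hn : s[j] = '\n'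
          · have hnq : ¬ '\n' = q := hn ▸ hq1
            rw [if_pos (Or.inr hn), if_neg hq1]
            simp [scanS, hn, hnq]
          · rw [if_neg (by tauto), ih (j+1) (by omega), List.drop_eq_nil_of_le (by omega)]
            simp [scanS, hq1, hn]
    · rw [stripScan, dif_neg h, List.drop_eq_nil_of_le (by omega)]
      simp [scanS]


theorem stripAux_comment (s : List Char) (fuel i : Nat) (hin : i < s.length) (hC : s[i] = '#')
    (jN : Nat) (hj : jN = if PySem.Chars.findFrom s ['\n'] (i : Int) none = -1 then s.length
          else (PySem.Chars.findFrom s ['\n'] (i : Int) none).toNat) :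
    stripAux s (fuel+1) i = List.replicate (jN - i) ' ' ++ stripAux s fuel jN := by
  subst hj; rw [stripAux, dif_pos hin, if_pos hC]

theorem stripAux_triple (s : List Char) (fuel i : Nat) (hin : i < s.length) (hC : ¬ s[i] = '#')
    (hT : (s[i] = '\'' ∨ s[i] = '"') ∧
      (PySem.List.slice s (some (i : Int)) (some ((i : Int) + 3)) = ['\'', '\'', '\''] ∨
       PySem.List.slice s (some (i : Int)) (some ((i : Int) + 3)) = ['"', '"', '"']))
    (jN : Nat) (hj : jN = if PySem.Chars.findFrom s
            (PySem.List.slice s (some (i : Int)) (some ((i : Int) + 3))) ((i : Int) + 3) none = -1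
          then s.length
          else (PySem.Chars.findFrom s
            (PySem.List.slice s (some (i : Int)) (some ((i : Int) + 3))) ((i : Int) + 3) none).toNat + 3) :
    stripAux s (fuel+1) i =
      blankPN (PySem.List.slice s (some (i : Int)) (some (jN : Int))) ++ stripAux s fuel jN := by
  subst hj; rw [stripAux, dif_pos hin, if_neg hC, if_pos hT]

theorem stripAux_single (s : List Char) (fuel i : Nat) (hin : i < s.length) (hC : ¬ s[i] = '#')
    (hT : ¬ ((s[i] = '\'' ∨ s[i] = '"') ∧
      (PySem.List.slice s (some (i : Int)) (some ((i : Int) + 3)) = ['\'', '\'', '\''] ∨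
       PySem.List.slice s (some (i : Int)) (some ((i : Int) + 3)) = ['"', '"', '"'])))
    (hq : s[i] = '\'' ∨ s[i] = '"') :
    stripAux s (fuel+1) i =
      blankPN (PySem.List.slice s (some (i : Int)) (some ((stripScan s s[i] (i+1) : Nat) : Int))) ++
        stripAux s fuel (stripScan s s[i] (i+1)) := by
  rw [stripAux, dif_pos hin, if_neg hC, if_neg hT, if_pos hq]

theorem stripAux_default (s : List Char) (fuel i : Nat) (hin : i < s.length)
    (hC : ¬ s[i] = '#') (hq : ¬ (s[i] = '\'' ∨ s[i] = '"')) :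
    stripAux s (fuel+1) i = s[i] :: stripAux s fuel (i+1) := by
  rw [stripAux, dif_pos hin, if_neg hC, if_neg (fun h => hq h.1), if_neg hq]

theorem main_eq (s : List Char) : ∀ (fuel i : Nat), s.length - i < fuel →
    stripAux s fuel i = runB .normal (s.drop i) := by
  intro fuel
  induction fuel with
  | zero => intro i h; omega
  | succ fuel ih =>
    intro i hfuel
    by_cases hin : i < s.length
    · have hd : s.drop i = s[i] :: s.drop (i+1) := List.drop_eq_getElem_cons hin
      by_cases hC : s[i] = '#'
      · -- comment branch
        have hlen1 : (s.drop i).length = s.length - i := by simp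
        have hdlen : (s.drop (i+1)).length = s.length - (i+1) := by simp
        by_cases hm : '\n' ∈ s.drop i
        · have hfind : PySem.Chars.find (s.drop i) ['\n']
              = ((List.takeWhile (· ≠ '\n') (s.drop i)).length : Int) := by
            rw [find_singleton, if_pos hm]
          have htw : List.takeWhile (· ≠ '\n') (s.drop i)
              = '#' :: List.takeWhile (· ≠ '\n') (s.drop (i+1)) := by
            rw [hd, hC]; simp
          set lt := (List.takeWhile (· ≠ '\n') (s.drop (i+1))).length with hlt
          have hf : (List.takeWhile (· ≠ '\n') (s.drop i)).length = lt + 1 := by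
            rw [htw]; simp [hlt]
          have hltle : lt ≤ s.length - (i+1) := by
            have h1 := (List.takeWhile_sublist ((· ≠ '\n')) (l := s.drop (i+1))).length_le
            rw [hdlen] at h1
            rw [hlt]; omega
          have hFF : PySem.Chars.findFrom s ['\n'] (i : Int) none = ((i + lt + 1 : Nat) : Int) := by
            rw [PySem.Chars.findFrom_natCast s ['\n'] i (le_of_lt hin), hfind, hf]
            rw [if_neg (by omega)]
            push_cast; ring
          rw [stripAux_comment s fuel i hin hC (i + lt + 1)
            (by rw [hFF, if_neg (by omega)]; omega)]
          rw [ih (i + lt + 1) (by omega)]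
          have hdrop : s.drop (i + lt + 1) = List.dropWhile (· ≠ '\n') (s.drop (i+1)) := by
            rw [← drop_takeWhile_len (· ≠ '\n') (s.drop (i+1)), ← hlt, List.drop_drop]
            congr 1; omega
          rw [hdrop, hd, hC, runB_cons]
          rw [show stepB .normal '#' = (.comment, [' ']) from by simp [stepB, normalStep]]
          rw [runB_comment, ← hlt]
          rw [show i + lt + 1 - i = lt + 1 from by omega, List.replicate_succ]
          simp
        · have hfind : PySem.Chars.find (s.drop i) ['\n'] = -1 := by
            rw [find_singleton, if_neg hm]
          have hFF : PySem.Chars.findFrom s ['\n'] (i : Int) none = -1 := by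
            rw [PySem.Chars.findFrom_natCast s ['\n'] i (le_of_lt hin), hfind]
            simp
          rw [stripAux_comment s fuel i hin hC s.length (by rw [hFF]; simp)]
          rw [ih s.length (by omega), List.drop_length]
          have hnot : ∀ x ∈ s.drop (i+1), x ≠ '\n' := by
            intro x hx hxn
            exact hm (by rw [hd]; exact List.mem_cons_of_mem _ (hxn ▸ hx))
          have htw : List.takeWhile (· ≠ '\n') (s.drop (i+1)) = s.drop (i+1) :=
            List.takeWhile_eq_self_iff.2 (by simpa using hnot)
          have hdw : List.dropWhile (· ≠ '\n') (s.drop (i+1)) = [] :=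
            List.dropWhile_eq_nil_iff.2 (by simpa using hnot)
          rw [hd, hC, runB_cons]
          rw [show stepB .normal '#' = (.comment, [' ']) from by simp [stepB, normalStep]]
          rw [runB_comment, htw, hdw, hdlen]
          rw [show s.length - i = (s.length - (i+1)) + 1 from by omega, List.replicate_succ]
          simp [runB]
      · by_cases hT : (s[i] = '\'' ∨ s[i] = '"') ∧
            (PySem.List.slice s (some (i : Int)) (some ((i : Int) + 3)) = ['\'', '\'', '\''] ∨
             PySem.List.slice s (some (i : Int)) (some ((i : Int) + 3)) = ['"', '"', '"'])
        · obtain ⟨hq3, hsl⟩ := hT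
          have hqn : s[i] ≠ '\n' := by rcases hq3 with h | h <;> rw [h] <;> decide
          have hslice3 : PySem.List.slice s (some (i : Int)) (some ((i : Int) + 3))
              = List.take 3 (List.drop i s) := by
            rw [show ((i : Int) + 3) = ((i + 3 : Nat) : Int) from by push_cast; ring,
              PySem.List.slice_natCast]
            congr 1
            omega
          have hS : List.take 3 (List.drop i s) = [s[i], s[i], s[i]] := by
            rw [hslice3] at hsl
            rcases hsl with h | h <;>
              · have h2 := h
                rw [hd, show (3 : Nat) = 2 + 1 from rfl, List.take_succ_cons] at h2
                have hc := (List.cons_eq_cons.mp h2).1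
                rw [h, hc]
          have hlen3 : i + 3 ≤ s.length := by
            have h1 := congrArg List.length hS
            simp at h1
            omega
          have hd3 : List.drop i s = s[i] :: s[i] :: s[i] :: List.drop (i+3) s := by
            conv_lhs => rw [← List.take_append_drop 3 (List.drop i s)]
            rw [hS, List.drop_drop]
            congr 2
          have hFc : PySem.Chars.findFrom s (PySem.List.slice s (some (i : Int)) (some ((i : Int) + 3)))
                ((i : Int) + 3) none
              = if PySem.Chars.find (List.drop (i+3) s) [s[i], s[i], s[i]] = -1 then -1
                else ((i + 3 : Nat) : Int) + PySem.Chars.find (List.drop (i+3) s) [s[i], s[i], s[i]] := by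
            rw [hslice3, hS, show ((i : Int) + 3) = ((i + 3 : Nat) : Int) from by push_cast; ring]
            exact PySem.Chars.findFrom_natCast s [s[i], s[i], s[i]] (i+3) hlen3
          have hscanT := scanT_zero_find s[i] (List.drop (i+3) s)
          have hrlen : (List.drop (i+3) s).length = s.length - (i+3) := by simp
          by_cases hf : PySem.Chars.find (List.drop (i+3) s) [s[i], s[i], s[i]] = -1
          · rw [if_pos hf] at hFc
            rw [hf, if_pos rfl] at hscanT
            have hscanN : scanT s[i] 0 (List.drop (i+3) s) = (List.drop (i+3) s).length := by
              exact_mod_cast hscanT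
            rw [stripAux_triple s fuel i hin hC ⟨hq3, hsl⟩ s.length (by rw [hFc]; simp)]
            rw [ih s.length (by omega), List.drop_length]
            rw [PySem.List.slice_natCast]
            rw [List.take_of_length_le (by simp)]
            rw [hd3, runB_cons]
            rw [show stepB .normal s[i] = (.q1 s[i], [' ']) from by
              simp [stepB, normalStep, hC, hq3]]
            rw [runB_cons]
            rw [show stepB (.q1 s[i]) s[i] = (.q2 s[i], [' ']) from by simp [stepB]]
            rw [runB_cons]
            rw [show stepB (.q2 s[i]) s[i] = (.triple s[i] 0, [' ']) from by simp [stepB]]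
            rw [runB_triple s[i] hq3 (List.drop (i+3) s) 0, hscanN]
            rw [List.take_of_length_le le_rfl, List.drop_length]
            simp [blankPN, hqn, runB]
          · rw [if_neg hf] at hFc
            rw [if_neg hf] at hscanT
            have hfnn : 0 ≤ PySem.Chars.find (List.drop (i+3) s) [s[i], s[i], s[i]] := by
              have := PySem.Chars.neg_one_le_find (List.drop (i+3) s) [s[i], s[i], s[i]]
              omega
            set F := PySem.Chars.find (List.drop (i+3) s) [s[i], s[i], s[i]] with hFdef
            have hpre := (PySem.Chars.find_spec hfnn).1
            have hFlen : F.toNat + 3 ≤ (List.drop (i+3) s).length := by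
              have h1 := hpre.length_le
              simp at h1
              omega
            have hscanN : scanT s[i] 0 (List.drop (i+3) s) = F.toNat + 3 := by omega
            have hjN : (i + 3 + F.toNat) + 3
                = if PySem.Chars.findFrom s
                    (PySem.List.slice s (some (i : Int)) (some ((i : Int) + 3))) ((i : Int) + 3) none = -1
                  then s.length
                  else (PySem.Chars.findFrom s
                    (PySem.List.slice s (some (i : Int)) (some ((i : Int) + 3))) ((i : Int) + 3) none).toNat + 3 := by
              rw [hFc, if_neg (by omega)]
              omega
            rw [stripAux_triple s fuel i hin hC ⟨hq3, hsl⟩ ((i + 3 + F.toNat) + 3) hjN]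
            rw [ih ((i + 3 + F.toNat) + 3) (by omega)]
            rw [show (((i + 3 + F.toNat) + 3 : Nat) : Int)
                = ((i + (F.toNat + 6) : Nat) : Int) from by push_cast; ring]
            rw [PySem.List.slice_natCast]
            rw [show i + (F.toNat + 6) - i = ((F.toNat + 3) + 1 + 1) + 1 from by omega]
            rw [hd3, List.take_succ_cons, List.take_succ_cons, List.take_succ_cons]
            have hdropj : List.drop ((i + 3 + F.toNat) + 3) s
                = List.drop (F.toNat + 3) (List.drop (i+3) s) := by
              rw [List.drop_drop]
              congr 1
            rw [hdropj]
            rw [runB_cons]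
            rw [show stepB .normal s[i] = (.q1 s[i], [' ']) from by
              simp [stepB, normalStep, hC, hq3]]
            rw [runB_cons]
            rw [show stepB (.q1 s[i]) s[i] = (.q2 s[i], [' ']) from by simp [stepB]]
            rw [runB_cons]
            rw [show stepB (.q2 s[i]) s[i] = (.triple s[i] 0, [' ']) from by simp [stepB]]
            rw [runB_triple s[i] hq3 (List.drop (i+3) s) 0, hscanN]
            simp [blankPN, hqn]
        · by_cases hq : s[i] = '\'' ∨ s[i] = '"'
          · have hqn : s[i] ≠ '\n' := by rcases hq with h | h <;> rw [h] <;> decide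
            have hslice3 : PySem.List.slice s (some (i : Int)) (some ((i : Int) + 3))
                = List.take 3 (List.drop i s) := by
              rw [show ((i : Int) + 3) = ((i + 3 : Nat) : Int) from by push_cast; ring,
                PySem.List.slice_natCast]
              congr 1
              omega
            have hdlen : (s.drop (i+1)).length = s.length - (i+1) := by simp
            have htake2 : (s.drop (i+1)).take 2 ≠ [s[i], s[i]] := by
              intro h
              apply hT
              refine ⟨hq, ?_⟩
              have h3 : List.take 3 (List.drop i s) = [s[i], s[i], s[i]] := by
                rw [hd, show (3 : Nat) = 2 + 1 from rfl, List.take_succ_cons, h]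
              rcases hq with h' | h' <;> rw [hslice3, h3, h'] <;> simp
            have hscan : stripScan s s[i] (i+1) = (i+1) + scanS s[i] (s.drop (i+1)) :=
              stripScan_eq s s[i] (i+1)
            have hsle : scanS s[i] (s.drop (i+1)) ≤ (s.drop (i+1)).length :=
              scanS_le s[i] (s.drop (i+1))
            rw [stripAux_single s fuel i hin hC hT hq]
            rw [hscan]
            rw [ih ((i+1) + scanS s[i] (s.drop (i+1))) (by omega)]
            rw [show (((i+1) + scanS s[i] (s.drop (i+1)) : Nat) : Int)
                = (((i + (1 + scanS s[i] (s.drop (i+1))) : Nat)) : Int) from by push_cast; ring]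
            rw [PySem.List.slice_natCast]
            rw [show i + (1 + scanS s[i] (s.drop (i+1))) - i = scanS s[i] (s.drop (i+1)) + 1 from by omega]
            rw [hd, List.take_succ_cons]
            have hdropj : List.drop ((i+1) + scanS s[i] (s.drop (i+1))) s
                = List.drop (scanS s[i] (s.drop (i+1))) (List.drop (i+1) s) := by
              rw [List.drop_drop]
            rw [hdropj]
            rw [runB_cons]
            rw [show stepB .normal s[i] = (.q1 s[i], [' ']) from by
              simp [stepB, normalStep, hC, hq]]
            rw [runB_q1 s[i] hq (s.drop (i+1)) htake2]
            simp [blankPN, hqn]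
          · rw [stripAux_default s fuel i hin hC hq]
            rw [hd, runB_cons]
            rw [show stepB .normal s[i] = (.normal, [s[i]]) from by
              simp [stepB, normalStep, hC, hq]]
            rw [ih (i+1) (by omega)]
            simp
    · rw [stripAux, dif_neg hin, List.drop_eq_nil_of_le (by omega)]
      simp [runB]


-- ===== VERDICT (by name: the statement is the Claim_ definition above) =====
theorem strip_python_spec : Claim_equal_strip_python := by
  intro src _
  unfold Spec_strip_python strip_python strip_python_alt
  rw [foldB_eq, main_eq src.toList (src.toList.length + 1) 0 (by omega)]
  simp
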